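-- pv_equiv track=rewrite | github.com/tomulanovski/gene2net | scripts/polyphest_to_grampa_reformat.py | replace_leaf_names_in_order
-- ===== SOURCE A (Python) =====
-- from collections import defaultdict
--
-- def replace_leaf_names_in_order(newick_string, leaves):
--     """Replace leaf names in the order they appear, adding copy numbers."""
--     species_counts = defaultdict(int)
--     result = ""
--     i = 0
--
--     while i < len(newick_string):
--         # Check if we're at the start of a potential leaf name
--         found_leaf = False
--
--         # Try to match the longest possible leaf name first
--         for leaf in sorted(set(leaves), key=len, reverse=True):
--             if newick_string[i:].startswith(leaf):
--                 # Check if this is a complete word boundary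
--                 # Before: should be (, or start of string
--                 before_ok = i == 0 or newick_string[i-1] in "(,"
--                 # After: should be :, ,, ), ; or end of string
--                 after_ok = (i + len(leaf) >= len(newick_string) or
--                            newick_string[i + len(leaf)] in ",:);")
--
--                 if before_ok and after_ok:
--                     species_counts[leaf] += 1
--                     copy_number = species_counts[leaf]
--                     new_name = f"{copy_number}_{leaf}"
--                     result += new_name
--                     i += len(leaf)
--                     found_leaf = True
--                     break
--
--         if not found_leaf:
--             result += newick_string[i]
--             i += 1
--
--     return result
-- ===== SOURCE B (Python) =====
-- def _emit(token, prev, nxt, leaf_set, counts):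
--     """Emit one token: rename it if it is a leaf in renaming position."""
--     if (token in leaf_set
--             and (prev is None or prev in "(,")
--             and (nxt is None or nxt in ",:);")):
--         counts[token] = counts.get(token, 0) + 1
--         return f"{counts[token]}_{token}"
--     return token
--
-- def replace_leaf_names_in_order(newick_string, leaves):
--     """Replace leaf names in the order they appear, adding copy numbers."""
--     leaf_set = set(leaves)
--     counts = {}
--     out = []
--     prev = None      # delimiter preceding the current token (None = start)
--     token = ""
--     for ch in newick_string:
--         if ch in "(),:;":
--             out.append(_emit(token, prev, ch, leaf_set, counts))
--             out.append(ch)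
--             prev = ch
--             token = ""
--         else:
--             token += ch
--     out.append(_emit(token, prev, None, leaf_set, counts))
--     return "".join(out)
-- ===== Notes on version B (the rewrite author's own statement) =====
-- stated objective: faster
-- what changed: B replaces A's per-position scan that tries every leaf (longest first) with boundary checks by a single tokenizing pass: it splits the string into delimiter-free tokens on '(),:;' and renames a token when it is a leaf preceded by start/'('/',' and followed by end/','/':'/')'/';'.
-- outside the precondition, e.g. on replace_leaf_names_in_order('A,B', ['A,B']): A returns '1_A,B', B returns 'A,B'; on replace_leaf_names_in_order('(,)', ['']): A does not finish within the time limit, B returns '(1_,2_)'; on replace_leaf_names_in_order('x', ['']): A returns 'x', B returns 'x'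
import Mathlib
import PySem

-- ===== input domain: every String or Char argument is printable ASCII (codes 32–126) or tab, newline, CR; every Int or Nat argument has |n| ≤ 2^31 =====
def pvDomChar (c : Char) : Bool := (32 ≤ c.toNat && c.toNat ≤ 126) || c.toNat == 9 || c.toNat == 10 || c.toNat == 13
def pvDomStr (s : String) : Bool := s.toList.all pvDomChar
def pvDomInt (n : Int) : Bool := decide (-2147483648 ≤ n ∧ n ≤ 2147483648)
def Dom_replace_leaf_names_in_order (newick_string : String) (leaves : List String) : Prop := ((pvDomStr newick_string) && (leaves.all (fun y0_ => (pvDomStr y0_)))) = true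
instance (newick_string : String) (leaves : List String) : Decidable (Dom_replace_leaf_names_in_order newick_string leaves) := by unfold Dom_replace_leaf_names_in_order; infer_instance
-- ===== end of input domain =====

-- B replaces A's per-position longest-leaf scan by a single tokenizing pass over the
-- delimiters '(),:;' (asymptotically faster); equal on leaves that are nonempty and
-- delimiter-free (Pre_).


-- ===== PORT A =====
-- membership in the Python string literals "(," and ",:);"
def pvIsBefore (c : Char) : Bool := c == '(' || c == ','
def pvIsAfter (c : Char) : Bool := c == ',' || c == ':' || c == ')' || c == ';'

-- startswith + before_ok + after_ok for one candidate leaf at position i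
def pvMatchesA (cs : List Char) (i : Nat) (leaf : List Char) : Bool :=
  leaf.isPrefixOf (cs.drop i) &&
  (i == 0 || (cs[i-1]?).any pvIsBefore) &&
  (decide (cs.length ≤ i + leaf.length) || (cs[i + leaf.length]?).any pvIsAfter)

-- A's while-loop; the inner `for leaf in sorted(...)` with `break` is `find?`.
def pvLoopA (cs : List Char) (ordered : List (List Char)) (i : Nat)
    (counts : PySem.Dict (List Char) Int) (acc : List Char) : List Char :=
  if h : i < cs.length then
    match ordered.find? (pvMatchesA cs i) with
    | some leaf =>
      if hl : leaf.length = 0 then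
        -- Python loops forever when an empty leaf matches (excluded by Pre_); copy a char to stay total
        pvLoopA cs ordered (i+1) counts (acc ++ [cs[i]])
      else
        let n : Int := counts.getD leaf 0 + 1
        pvLoopA cs ordered (i + leaf.length) (counts.insert leaf n)
          (acc ++ PySem.Int.toChars n ++ ['_'] ++ leaf)
    | none => pvLoopA cs ordered (i+1) counts (acc ++ [cs[i]])
  else acc
termination_by cs.length - i
decreasing_by all_goals omega

def replace_leaf_names_in_order (newick_string : String) (leaves : List String) : String :=
  -- sorted(set(leaves), key=len, reverse=True), working on the char lists
  let ordered := PySem.List.sorted (PySem.Set.ofList (leaves.map String.toList))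
      (fun l => l.length) true
  String.ofList (pvLoopA newick_string.toList ordered 0 PySem.Dict.empty [])

-- ===== PORT B =====
-- membership in the Python string literal "(),:;"
def pvIsDelim (c : Char) : Bool := c == '(' || c == ')' || c == ',' || c == ':' || c == ';'

-- Source B's _emit: rename the finished token if it is a leaf in renaming position
def pvEmitB (token : List Char) (prev : Option Char) (nxt : Option Char)
    (leafSet : List (List Char)) (counts : PySem.Dict (List Char) Int) :
    List Char × PySem.Dict (List Char) Int :=
  if leafSet.contains token && prev.all pvIsBefore && nxt.all pvIsAfter then
    let n : Int := counts.getD token 0 + 1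
    (PySem.Int.toChars n ++ ['_'] ++ token, counts.insert token n)
  else (token, counts)

-- Source B's single pass: accumulate a token, flush it at each delimiter and at the end
def pvLoopB (cs : List Char) (leafSet : List (List Char)) (prev : Option Char)
    (token : List Char) (counts : PySem.Dict (List Char) Int) (out : List Char) : List Char :=
  match cs with
  | [] => out ++ (pvEmitB token prev none leafSet counts).1
  | c :: rest =>
    if pvIsDelim c then
      let e := pvEmitB token prev (some c) leafSet counts
      pvLoopB rest leafSet (some c) [] e.2 (out ++ e.1 ++ [c])
    else
      pvLoopB rest leafSet prev (token ++ [c]) counts out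

def replace_leaf_names_in_order_alt (newick_string : String) (leaves : List String) : String :=
  let leafSet := PySem.Set.ofList (leaves.map String.toList)
  String.ofList (pvLoopB newick_string.toList leafSet none [] PySem.Dict.empty [])

-- ===== PRECONDITION & SPEC =====
-- Pre_ excludes leaves that are empty (A then loops forever as soon as such a leaf
-- qualifies at some position) and leaves that contain a newick delimiter '(),:;' AND
-- occur somewhere in the string (A may then rename across token boundaries, a reading
-- no caller of a newick renamer wants and that B's tokenizer deliberately does not
-- reproduce); delimiter-containing leaves absent from the string are admitted.
def Pre_replace_leaf_names_in_order (newick_string : String) (leaves : List String) : Prop :=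
  ∀ l ∈ leaves, l.toList ≠ [] ∧
    ((l.toList.all (fun c => !(c == '(' || c == ')' || c == ',' || c == ':' || c == ';'))) = true ∨
      PySem.Chars.isIn l.toList newick_string.toList = false)
instance (newick_string : String) (leaves : List String) :
    Decidable (Pre_replace_leaf_names_in_order newick_string leaves) := by
  unfold Pre_replace_leaf_names_in_order; infer_instance

def pvWitness_replace_leaf_names_in_order : String × List String := ("((A,B),A);", ["A", "B"])

def Spec_replace_leaf_names_in_order (newick_string : String) (leaves : List String) (out : String) : Prop := out = replace_leaf_names_in_order_alt newick_string leaves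
instance (newick_string : String) (leaves : List String) (out : String) : Decidable (Spec_replace_leaf_names_in_order newick_string leaves out) := by unfold Spec_replace_leaf_names_in_order; infer_instance

-- ===== CLAIM (what is proved, stated in full; the proofs are below) =====
def Claim_equal_replace_leaf_names_in_order : Prop := ∀ (newick_string : String) (leaves : List String), Dom_replace_leaf_names_in_order newick_string leaves → Pre_replace_leaf_names_in_order newick_string leaves → Spec_replace_leaf_names_in_order newick_string leaves (replace_leaf_names_in_order newick_string leaves)

-- ===== LEMMAS AND PROOFS =====

lemma pv_before_delim {c : Char} (h : pvIsBefore c = true) : pvIsDelim c = true := by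
  simp only [pvIsBefore, pvIsDelim, Bool.or_eq_true, beq_iff_eq] at *; tauto

lemma pv_after_delim {c : Char} (h : pvIsAfter c = true) : pvIsDelim c = true := by
  simp only [pvIsAfter, pvIsDelim, Bool.or_eq_true, beq_iff_eq] at *; tauto

-- a maximal p-prefix is THE takeWhile
lemma pv_prefix_takeWhile {p : Char → Bool} :
    ∀ (L s : List Char), L <+: s → (∀ c ∈ L, p c = true) →
      (s[L.length]?).any p = false → L = s.takeWhile p := by
  intro L
  induction L with
  | nil =>
    intro s _ _ hafter
    cases s with
    | nil => rfl
    | cons a t =>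
      simp only [List.length_nil, List.getElem?_cons_zero, Option.any_some] at hafter
      simp [hafter]
  | cons a L ih =>
    intro s hpre hall hafter
    cases s with
    | nil => exact absurd hpre (by simp)
    | cons b t =>
      obtain ⟨hab, hpre'⟩ := List.cons_prefix_cons.mp hpre
      subst hab
      have hpa : p a = true := hall a (by simp)
      rw [List.takeWhile_cons, if_pos hpa]
      rw [← ih t hpre' (fun c hc => hall c (by simp [hc])) (by simpa using hafter)]

-- the element right after takeWhile fails p
lemma pv_takeWhile_get (p : Char → Bool) (l : List Char) (d : Char)
    (h : l[(l.takeWhile p).length]? = some d) : p d = false := by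
  induction l generalizing d with
  | nil => simp at h
  | cons a t ih =>
    by_cases hpa : p a = true
    · rw [List.takeWhile_cons, if_pos hpa] at h
      simp only [List.length_cons, List.getElem?_cons_succ] at h
      exact ih d h
    · rw [List.takeWhile_cons, if_neg hpa] at h
      simp only [List.length_nil, List.getElem?_cons_zero, Option.some.injEq] at h
      rw [← h]
      exact Bool.eq_false_iff.mpr hpa

-- a matched leaf occurs in the string
lemma pv_matches_infix {cs L : List Char} {i : Nat} (hm : pvMatchesA cs i L = true) :
    L <:+: cs := by
  simp only [pvMatchesA, Bool.and_eq_true] at hm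
  exact (List.isPrefixOf_iff_prefix.mp hm.1.1).isInfix.trans (List.drop_suffix i cs).isInfix

-- any leaf A matches at i is exactly the token starting at i
lemma pv_matchesA_eq_tok {cs L : List Char} {i : Nat}
    (hL : ∀ c ∈ L, pvIsDelim c = false) (hm : pvMatchesA cs i L = true) :
    L = (cs.drop i).takeWhile (fun c => !pvIsDelim c) := by
  simp only [pvMatchesA, Bool.and_eq_true] at hm
  obtain ⟨⟨h1, _⟩, h3⟩ := hm
  refine pv_prefix_takeWhile L (cs.drop i) (List.isPrefixOf_iff_prefix.mp h1)
    (fun c hc => by simp [hL c hc]) ?_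
  rw [List.getElem?_drop]
  rw [Bool.or_eq_true] at h3
  rcases h3 with hle | hany
  · rw [List.getElem?_eq_none (of_decide_eq_true hle)]; rfl
  · cases hx : cs[i + L.length]? with
    | none => rfl
    | some d =>
      rw [hx] at hany
      simp only [Option.any_some] at hany
      simp [pv_after_delim hany]

-- A's find? over the sorted leaf list, characterised by the token at i
lemma pv_find_eq (cs : List Char) (i : Nat) (ordered : List (List Char))
    (hProps : ∀ L ∈ ordered, (∀ c ∈ L, pvIsDelim c = false) ∨ ¬ L <:+: cs)
    (T : List Char) (hT : T = (cs.drop i).takeWhile (fun c => !pvIsDelim c)) :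
    ordered.find? (pvMatchesA cs i) =
      if ((i == 0 || (cs[i-1]?).any pvIsBefore) && ordered.contains T &&
          (decide (cs.length ≤ i + T.length) || (cs[i + T.length]?).any pvIsAfter)) then
        some T
      else none := by
  induction ordered with
  | nil => simp
  | cons L ls ih =>
    have hPls : ∀ M ∈ ls, (∀ c ∈ M, pvIsDelim c = false) ∨ ¬ M <:+: cs :=
      fun M hM => hProps M (List.mem_cons_of_mem _ hM)
    rw [List.find?_cons]
    by_cases hm : pvMatchesA cs i L = true
    · have hLdf : ∀ c ∈ L, pvIsDelim c = false := by
        rcases hProps L List.mem_cons_self with h | h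
        · exact h
        · exact absurd (pv_matches_infix hm) h
      have hLT : L = T := hT ▸ pv_matchesA_eq_tok hLdf hm
      subst hLT
      rw [hm]
      have hm' := hm
      simp only [pvMatchesA, Bool.and_eq_true] at hm'
      obtain ⟨⟨_, h2⟩, h3⟩ := hm'
      rw [if_pos (by simp [h2, h3])]
    · rw [Bool.eq_false_iff.mpr hm]
      rw [ih hPls]
      by_cases hLs : ls.contains T = true
      · have hmem' : T ∈ ls := List.contains_iff_mem.mp hLs
        simp [hmem']
      · by_cases hLT : (T == L) = true
        · have hTL : T = L := by simpa using hLT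
          have hpre : T.isPrefixOf (cs.drop i) = true :=
            List.isPrefixOf_iff_prefix.mpr (hT ▸ List.takeWhile_prefix _)
          have hnm : ¬ (((i == 0 || (cs[i-1]?).any pvIsBefore) = true) ∧
              ((decide (cs.length ≤ i + T.length) || (cs[i + T.length]?).any pvIsAfter) = true)) := by
            rintro ⟨hb, ha⟩
            exact hm (by rw [← hTL]; simp [pvMatchesA, hpre, hb, ha])
          rw [Bool.eq_false_iff.mpr hLs]
          cases hb : (i == 0 || (cs[i-1]?).any pvIsBefore) with
          | false => simp
          | true =>
            cases ha : (decide (cs.length ≤ i + T.length) || (cs[i + T.length]?).any pvIsAfter) with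
            | false => simp
            | true => exact absurd ⟨hb, ha⟩ hnm
        · have h1 : T ≠ L := by simpa using hLT
          have h2 : T ∉ ls := fun h => hLs (List.contains_iff_mem.mpr h)
          simp [h1, h2]

-- no leaf matches at a delimiter position
lemma pv_find_none_delim {cs : List Char} {i : Nat} (ordered : List (List Char))
    (h : i < cs.length) (hd : pvIsDelim (cs[i]'h) = true)
    (hne : ∀ L ∈ ordered, L ≠ [])
    (hProps : ∀ L ∈ ordered, (∀ c ∈ L, pvIsDelim c = false) ∨ ¬ L <:+: cs) :
    ordered.find? (pvMatchesA cs i) = none := by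
  rw [List.find?_eq_none]
  intro L hL hm
  have hLdf : ∀ c ∈ L, pvIsDelim c = false := by
    rcases hProps L hL with h | h
    · exact h
    · exact absurd (pv_matches_infix hm) h
  have hLT := pv_matchesA_eq_tok hLdf hm
  rw [← List.getElem_cons_drop h, List.takeWhile_cons] at hLT
  rw [if_neg (by simp [hd])] at hLT
  exact hne L hL hLT

-- A copies characters one by one through a stretch with no match
lemma pv_loopA_copy {cs : List Char} {ordered : List (List Char)} :
    ∀ (m i : Nat) (counts : PySem.Dict (List Char) Int) (acc : List Char),
      i + m ≤ cs.length →
      (∀ k, i ≤ k → k < i + m → ordered.find? (pvMatchesA cs k) = none) →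
      pvLoopA cs ordered i counts acc
        = pvLoopA cs ordered (i + m) counts (acc ++ (cs.drop i).take m) := by
  intro m
  induction m with
  | zero => intro i counts acc _ _; simp
  | succ m ihm =>
    intro i counts acc hle hnone
    have hi : i < cs.length := by omega
    rw [pvLoopA, dif_pos hi, hnone i (Nat.le_refl i) (by omega)]
    have := ihm (i+1) counts (acc ++ [cs[i]]) (by omega)
      (fun k hk1 hk2 => hnone k (by omega) (by omega))
    rw [this]
    have he : i + 1 + m = i + (m + 1) := by omega
    have hd : cs.drop i = cs[i] :: cs.drop (i+1) := (List.getElem_cons_drop hi).symm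
    rw [he, hd, List.take_succ_cons, List.append_assoc]
    rfl

-- B slides non-delimiter characters into the pending token
lemma pv_loopB_skip {S : List (List Char)} :
    ∀ (t rest : List Char) (prev : Option Char) (token : List Char)
      (counts : PySem.Dict (List Char) Int) (out : List Char),
      (∀ c ∈ t, pvIsDelim c = false) →
      pvLoopB (t ++ rest) S prev token counts out
        = pvLoopB rest S prev (token ++ t) counts out := by
  intro t
  induction t with
  | nil => intro rest prev token counts out _; simp
  | cons c t' ih =>
    intro rest prev token counts out h
    have hc : pvIsDelim c = false := h c List.mem_cons_self
    show pvLoopB (c :: (t' ++ rest)) S prev token counts out = _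
    rw [pvLoopB, if_neg (by simp [hc])]
    rw [ih rest prev (token ++ [c]) counts out
      (fun d hd => h d (List.mem_cons_of_mem _ hd))]
    simp

-- one A-step that renames a found leaf
lemma pv_loopA_found {cs : List Char} {ordered : List (List Char)} {i : Nat}
    (h : i < cs.length) {leaf : List Char}
    (hf : ordered.find? (pvMatchesA cs i) = some leaf) (hl : ¬ leaf.length = 0)
    (counts : PySem.Dict (List Char) Int) (acc : List Char) :
    pvLoopA cs ordered i counts acc
      = pvLoopA cs ordered (i + leaf.length)
          (counts.insert leaf (counts.getD leaf 0 + 1))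
          (acc ++ PySem.Int.toChars (counts.getD leaf 0 + 1) ++ ['_'] ++ leaf) := by
  rw [pvLoopA, dif_pos h, hf]
  exact dif_neg hl

-- the bisimulation: A at position i ≙ B on the suffix with prev = cs[i-1]
lemma pv_main (cs : List Char) (ordered leafSet : List (List Char))
    (hmem : ∀ L, L ∈ ordered ↔ L ∈ leafSet)
    (hne : ∀ L ∈ leafSet, L ≠ [])
    (hnd : ∀ L ∈ leafSet, (∀ c ∈ L, pvIsDelim c = false) ∨ ¬ L <:+: cs) :
    ∀ (n i : Nat) (counts : PySem.Dict (List Char) Int) (acc : List Char),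
      cs.length - i = n → i ≤ cs.length →
      pvLoopA cs ordered i counts acc
        = pvLoopB (cs.drop i) leafSet (if i = 0 then none else cs[i-1]?) [] counts acc := by
  have hcontnil : leafSet.contains ([] : List Char) = false := by
    rw [← Bool.not_eq_true, List.contains_iff_mem]
    exact fun h => hne [] h rfl
  have hneO : ∀ L ∈ ordered, L ≠ [] := fun L hL => hne L ((hmem L).mp hL)
  have hndO : ∀ L ∈ ordered, (∀ c ∈ L, pvIsDelim c = false) ∨ ¬ L <:+: cs :=
    fun L hL => hnd L ((hmem L).mp hL)
  intro n
  induction n using Nat.strong_induction_on with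
  | _ n ihn =>
  intro i counts acc hn hi
  rcases Nat.lt_or_ge i cs.length with hlt | hge
  swap
  · -- i = length: A's loop guard fails, B flushes the empty token
    have hieq : i = cs.length := le_antisymm hi hge
    rw [pvLoopA, dif_neg (by omega)]
    subst hieq
    rw [List.drop_length]
    have hnilmem : ([] : List Char) ∉ leafSet := fun h => hne [] h rfl
    simp [pvLoopB, pvEmitB, hnilmem]
  -- i < length: analyse the token starting at i
  set T := (cs.drop i).takeWhile (fun c => !pvIsDelim c) with hTdef
  have hTpre : T <+: cs.drop i := List.takeWhile_prefix _
  have hTlen : T.length ≤ cs.length - i := by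
    have := hTpre.length_le; simpa using this
  have hTnd : ∀ c ∈ T, pvIsDelim c = false := fun c hc => by
    have := List.mem_takeWhile_imp hc; simpa using this
  have hsplit : cs.drop i = T ++ cs.drop (i + T.length) := by
    conv_lhs => rw [← List.take_append_drop T.length (cs.drop i)]
    rw [List.drop_drop]
    congr 1
    exact (List.prefix_iff_eq_take.mp hTpre).symm
  by_cases hT0 : T = []
  · -- the token is empty: cs[i] is a delimiter; both sides copy it and advance
    have hdel : pvIsDelim (cs[i]'hlt) = true := by
      by_contra hc
      have hp : (!pvIsDelim (cs[i]'hlt)) = true := by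
        simp [Bool.eq_false_iff.mpr hc]
      have hconsT : T = cs[i] :: (cs.drop (i+1)).takeWhile (fun c => !pvIsDelim c) := by
        rw [hTdef, ← List.getElem_cons_drop hlt, List.takeWhile_cons, if_pos hp]
      rw [hconsT] at hT0
      simp at hT0
    have hA : pvLoopA cs ordered i counts acc
        = pvLoopA cs ordered (i+1) counts (acc ++ [cs[i]]) := by
      rw [pvLoopA, dif_pos hlt, pv_find_none_delim ordered hlt hdel hneO hndO]
    have hdropcons : cs.drop i = cs[i] :: cs.drop (i+1) := (List.getElem_cons_drop hlt).symm
    have hB : pvLoopB (cs.drop i) leafSet (if i = 0 then none else cs[i-1]?) [] counts acc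
        = pvLoopB (cs.drop (i+1)) leafSet (some cs[i]) [] counts (acc ++ [cs[i]]) := by
      rw [hdropcons, pvLoopB, if_pos hdel]
      have hnilmem : ([] : List Char) ∉ leafSet := fun h => hne [] h rfl
      simp [pvEmitB, hnilmem]
    rw [hA, hB]
    have hrec := ihn (cs.length - (i+1)) (by omega) (i+1) counts (acc ++ [cs[i]]) rfl (by omega)
    rw [hrec]
    have : (if i + 1 = 0 then none else cs[i+1-1]?) = some (cs[i]'hlt) := by
      simp [List.getElem?_eq_getElem hlt]
    rw [this]
  · -- nonempty token: both sides process it as one unit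
    set j := i + T.length with hj
    have hjgt : i < j := by
      have : 0 < T.length := List.length_pos_iff.mpr hT0
      omega
    have hjle : j ≤ cs.length := by omega
    have hfind := pv_find_eq cs i ordered hndO T hTdef
    have hcont : ordered.contains T = leafSet.contains T := by
      rw [Bool.eq_iff_iff]
      simp [hmem]
    -- previous-character test agreement
    have hprev : (if i = 0 then none else cs[i-1]?).all pvIsBefore
        = (i == 0 || (cs[i-1]?).any pvIsBefore) := by
      by_cases h0 : i = 0
      · simp [h0]
      · have hlt1 : i - 1 < cs.length := by omega
        simp [h0, List.getElem?_eq_getElem hlt1]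
    -- after-boundary at j, and the two continuations
    -- the A-side result of processing the token, for each emit outcome
    by_cases hcond : ((i == 0 || (cs[i-1]?).any pvIsBefore) && ordered.contains T &&
        (decide (cs.length ≤ j) || (cs[j]?).any pvIsAfter)) = true
    · -- the token is renamed
      have hc1 : (i == 0 || (cs[i-1]?).any pvIsBefore) = true := by
        rcases Bool.and_eq_true .. |>.mp hcond with ⟨h12, _⟩
        exact (Bool.and_eq_true .. |>.mp h12).1
      have hc2 : leafSet.contains T = true := by
        rcases Bool.and_eq_true .. |>.mp hcond with ⟨h12, _⟩
        rw [← hcont]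
        exact (Bool.and_eq_true .. |>.mp h12).2
      have hc3 : (decide (cs.length ≤ j) || (cs[j]?).any pvIsAfter) = true :=
        (Bool.and_eq_true .. |>.mp hcond).2
      have hA : pvLoopA cs ordered i counts acc
          = pvLoopA cs ordered j (counts.insert T (counts.getD T 0 + 1))
              (acc ++ PySem.Int.toChars (counts.getD T 0 + 1) ++ ['_'] ++ T) :=
        pv_loopA_found hlt (by rw [hfind, if_pos hcond]) (by simpa using hT0) counts acc
      rw [hA, hsplit, pv_loopB_skip T _ _ _ _ _ hTnd]
      simp only [List.nil_append]
      rcases Nat.lt_or_ge j cs.length with hjlt | hjge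
      · -- a delimiter follows the token
        have hjdel : pvIsDelim (cs[j]'hjlt) = true := by
          have h1 : (List.drop i cs)[((List.drop i cs).takeWhile (fun c => !pvIsDelim c)).length]?
              = some (cs[j]'hjlt) := by
            rw [← hTdef, List.getElem?_drop]
            exact List.getElem?_eq_getElem hjlt
          have hfail := pv_takeWhile_get (fun c => !pvIsDelim c) (cs.drop i) _ h1
          simpa using hfail
        have hjaft : pvIsAfter (cs[j]'hjlt) = true := by
          rw [Bool.or_eq_true] at hc3
          rcases hc3 with h | h
          · exact absurd (of_decide_eq_true h) (by omega)
          · rw [List.getElem?_eq_getElem hjlt] at h; simpa using h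
        have hdropj : cs.drop j = cs[j] :: cs.drop (j+1) := (List.getElem_cons_drop hjlt).symm
        have hB : pvLoopB (cs.drop j) leafSet (if i = 0 then none else cs[i-1]?) T counts acc
            = pvLoopB (cs.drop (j+1)) leafSet (some cs[j]) []
                (counts.insert T (counts.getD T 0 + 1))
                (acc ++ (PySem.Int.toChars (counts.getD T 0 + 1) ++ ['_'] ++ T) ++ [cs[j]]) := by
          rw [hdropj, pvLoopB, if_pos hjdel]
          have hemit : pvEmitB T (if i = 0 then none else cs[i-1]?) (some (cs[j]'hjlt)) leafSet counts
              = (PySem.Int.toChars (counts.getD T 0 + 1) ++ ['_'] ++ T,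
                 counts.insert T (counts.getD T 0 + 1)) := by
            unfold pvEmitB
            rw [if_pos (by rw [hprev]; simp [hc1, List.contains_iff_mem.mp hc2, hjaft])]
          rw [hemit]
        rw [hB]
        have hA2 : pvLoopA cs ordered j (counts.insert T (counts.getD T 0 + 1))
              (acc ++ PySem.Int.toChars (counts.getD T 0 + 1) ++ ['_'] ++ T)
            = pvLoopA cs ordered (j+1) (counts.insert T (counts.getD T 0 + 1))
              ((acc ++ PySem.Int.toChars (counts.getD T 0 + 1) ++ ['_'] ++ T) ++ [cs[j]]) := by
          rw [pvLoopA, dif_pos hjlt, pv_find_none_delim ordered hjlt hjdel hneO hndO]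
        rw [hA2]
        have hrec := ihn (cs.length - (j+1)) (by omega) (j+1)
          (counts.insert T (counts.getD T 0 + 1))
          ((acc ++ PySem.Int.toChars (counts.getD T 0 + 1) ++ ['_'] ++ T) ++ [cs[j]]) rfl (by omega)
        rw [hrec]
        have : (if j + 1 = 0 then none else cs[j+1-1]?) = some (cs[j]'hjlt) := by
          simp [List.getElem?_eq_getElem hjlt]
        rw [this]
        simp [List.append_assoc]
      · -- the token ends the string
        have hjeq : j = cs.length := le_antisymm hjle hjge
        rw [hjeq, List.drop_length, pvLoopA, dif_neg (by omega)]
        have hemit : pvEmitB T (if i = 0 then none else cs[i-1]?) none leafSet counts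
            = (PySem.Int.toChars (counts.getD T 0 + 1) ++ ['_'] ++ T,
               counts.insert T (counts.getD T 0 + 1)) := by
          unfold pvEmitB
          rw [if_pos (by rw [hprev]; simp [hc1, List.contains_iff_mem.mp hc2])]
        rw [pvLoopB, hemit]
        simp [List.append_assoc]
    · -- the token is left unchanged
      have hnors : ∀ k, i ≤ k → k < j → ordered.find? (pvMatchesA cs k) = none := by
        intro k hk1 hk2
        rcases Nat.eq_or_lt_of_le hk1 with rfl | hk1'
        · rw [hfind, if_neg hcond]
        · -- inside the token the preceding character is a token character
          rw [List.find?_eq_none]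
          intro L hL hm
          simp only [pvMatchesA, Bool.and_eq_true] at hm
          obtain ⟨⟨_, h2⟩, _⟩ := hm
          have hk0 : k ≠ 0 := by omega
          rw [Bool.or_eq_true] at h2
          rcases h2 with h | h
          · exact hk0 (by simpa using h)
          · have hklt : k - 1 < cs.length := by omega
            rw [List.getElem?_eq_getElem hklt] at h
            simp only [Option.any_some] at h
            -- cs[k-1] is an element of T
            have hmemT : (cs[k-1]'hklt) ∈ T := by
              have hidx : k - 1 - i < T.length := by omega
              have hdropk : (cs.drop i)[k - 1 - i]? = some (cs[k-1]'hklt) := by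
                rw [List.getElem?_drop, show i + (k - 1 - i) = k - 1 by omega]
                exact List.getElem?_eq_getElem hklt
              have hTk : T[k - 1 - i]? = some (cs[k-1]'hklt) := by
                rw [List.prefix_iff_eq_take.mp hTpre, List.getElem?_take_of_lt hidx, hdropk]
              exact List.mem_of_getElem? hTk
            have := hTnd _ hmemT
            rw [pv_before_delim h] at this
            exact Bool.noConfusion this
      have hA : pvLoopA cs ordered i counts acc
          = pvLoopA cs ordered j counts (acc ++ T) := by
        have := pv_loopA_copy T.length i counts acc (by omega) (by rw [← hj]; exact hnors)
        rw [this, ← hj, ← List.prefix_iff_eq_take.mp hTpre]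
      rw [hA, hsplit, pv_loopB_skip T _ _ _ _ _ hTnd]
      simp only [List.nil_append]
      rcases Nat.lt_or_ge j cs.length with hjlt | hjge
      · have hjdel : pvIsDelim (cs[j]'hjlt) = true := by
          have h1 : (List.drop i cs)[((List.drop i cs).takeWhile (fun c => !pvIsDelim c)).length]?
              = some (cs[j]'hjlt) := by
            rw [← hTdef, List.getElem?_drop]
            exact List.getElem?_eq_getElem hjlt
          have hfail := pv_takeWhile_get (fun c => !pvIsDelim c) (cs.drop i) _ h1
          simpa using hfail
        have hdropj : cs.drop j = cs[j] :: cs.drop (j+1) := (List.getElem_cons_drop hjlt).symm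
        have hcondB : (leafSet.contains T &&
            (if i = 0 then none else cs[i-1]?).all pvIsBefore &&
            (some (cs[j]'hjlt)).all pvIsAfter) = false := by
          rw [hprev]
          rw [← Bool.not_eq_true]
          intro h
          apply hcond
          rcases Bool.and_eq_true .. |>.mp h with ⟨h12, h3⟩
          rcases Bool.and_eq_true .. |>.mp h12 with ⟨hcs, hbs⟩
          rw [hcont]
          simp only [Option.all_some] at h3
          simp [hbs, List.contains_iff_mem.mp hcs, List.getElem?_eq_getElem hjlt, h3]
        have hB : pvLoopB (cs.drop j) leafSet (if i = 0 then none else cs[i-1]?) T counts acc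
            = pvLoopB (cs.drop (j+1)) leafSet (some cs[j]) [] counts (acc ++ T ++ [cs[j]]) := by
          rw [hdropj, pvLoopB, if_pos hjdel]
          have hemit : pvEmitB T (if i = 0 then none else cs[i-1]?) (some (cs[j]'hjlt)) leafSet counts
              = (T, counts) := by
            unfold pvEmitB
            rw [if_neg (Bool.eq_false_iff.mp hcondB)]
          rw [hemit]
        rw [hB]
        have hA2 : pvLoopA cs ordered j counts (acc ++ T)
            = pvLoopA cs ordered (j+1) counts ((acc ++ T) ++ [cs[j]]) := by
          rw [pvLoopA, dif_pos hjlt, pv_find_none_delim ordered hjlt hjdel hneO hndO]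
        rw [hA2]
        have hrec := ihn (cs.length - (j+1)) (by omega) (j+1) counts
          ((acc ++ T) ++ [cs[j]]) rfl (by omega)
        rw [hrec]
        have : (if j + 1 = 0 then none else cs[j+1-1]?) = some (cs[j]'hjlt) := by
          simp [List.getElem?_eq_getElem hjlt]
        rw [this]
      · have hjeq : j = cs.length := le_antisymm hjle hjge
        rw [hjeq, List.drop_length, pvLoopA, dif_neg (by omega)]
        have hcondB : (leafSet.contains T &&
            (if i = 0 then none else cs[i-1]?).all pvIsBefore &&
            (none : Option Char).all pvIsAfter) = false := by
          rw [hprev]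
          rw [← Bool.not_eq_true]
          intro h
          apply hcond
          rcases Bool.and_eq_true .. |>.mp h with ⟨h12, _⟩
          rcases Bool.and_eq_true .. |>.mp h12 with ⟨hcs, hbs⟩
          rw [hcont]
          have : decide (cs.length ≤ j) = true := by rw [hjeq]; simp
          simp [hbs, List.contains_iff_mem.mp hcs, this]
        have hemit : pvEmitB T (if i = 0 then none else cs[i-1]?) none leafSet counts
            = (T, counts) := by
          unfold pvEmitB
          rw [if_neg (Bool.eq_false_iff.mp hcondB)]
        rw [pvLoopB, hemit]

-- ===== VERDICT (by name: the statement is the Claim_ definition above) =====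
theorem replace_leaf_names_in_order_spec : Claim_equal_replace_leaf_names_in_order := by
  intro s leaves _ hpre
  unfold Spec_replace_leaf_names_in_order
  unfold replace_leaf_names_in_order replace_leaf_names_in_order_alt
  have hmemL : ∀ L, L ∈ PySem.Set.ofList (leaves.map String.toList) →
      ∃ t ∈ leaves, t.toList = L := by
    intro L hL
    have : L ∈ leaves.map String.toList := (PySem.Set.mem_ofList _ L).mp hL
    simpa [List.mem_map] using this
  have hne : ∀ L ∈ PySem.Set.ofList (leaves.map String.toList), L ≠ [] := by
    intro L hL h0
    obtain ⟨t, ht, rfl⟩ := hmemL L hL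
    exact (hpre t ht).1 h0
  have hnd : ∀ L ∈ PySem.Set.ofList (leaves.map String.toList),
      (∀ c ∈ L, pvIsDelim c = false) ∨ ¬ L <:+: s.toList := by
    intro L hL
    obtain ⟨t, ht, rfl⟩ := hmemL L hL
    rcases (hpre t ht).2 with h | h
    · left
      intro c hc
      have hx := List.all_eq_true.mp h c hc
      simpa [pvIsDelim] using hx
    · right
      exact (PySem.Chars.isIn_eq_false_iff _ _).mp h
  have hmem : ∀ L, L ∈ PySem.List.sorted (PySem.Set.ofList (leaves.map String.toList))
        (fun l => l.length) true ↔ L ∈ PySem.Set.ofList (leaves.map String.toList) :=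
    fun L => PySem.List.mem_sorted _ _ _ L
  have hmain := pv_main s.toList
    (PySem.List.sorted (PySem.Set.ofList (leaves.map String.toList)) (fun l => l.length) true)
    (PySem.Set.ofList (leaves.map String.toList)) hmem hne hnd
    s.toList.length 0 PySem.Dict.empty [] (by simp) (by simp)
  simp only [List.drop_zero] at hmain
  show String.ofList _ = String.ofList _
  rw [hmain]
  norm_num
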